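-- pv_equiv track=rewrite | github.com/erickyudha/mathbot-backend-api | arithmetic.py | covert_math_str_list
-- ===== SOURCE A (Python) =====
-- operators = {'|': 0,
--              '(': 5,
--              ')': 5,
--              '^': 2,
--              '*': 3,
--              '/': 3,
--              '+': 4,
--              '-': 4}
--
-- def covert_math_str_list(math_str):
--     math_str = math_str.replace(' ', '')
--     math_list = list(math_str)
--     for i in range(len(math_list)):
--         if math_list[i] in operators:
--             math_list[i] = f' {math_list[i]} '
--     math_list = ''.join(math_list).split()
--     return math_list
-- ===== SOURCE B (Python) =====
-- operators = {'|': 0,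
--              '(': 5,
--              ')': 5,
--              '^': 2,
--              '*': 3,
--              '/': 3,
--              '+': 4,
--              '-': 4}
--
-- def covert_math_str_list(math_str):
--     math_str = math_str.replace(' ', '')
--     result = []
--     buf = ''
--     for c in math_str:
--         if c in operators:
--             if buf:
--                 result.append(buf)
--             result.append(c)
--             buf = ''
--         elif c.isspace():
--             if buf:
--                 result.append(buf)
--             buf = ''
--         else:
--             buf += c
--     if buf:
--         result.append(buf)
--     return result
-- ===== Notes on version B (the rewrite author's own statement) =====
-- stated objective: alternative
-- what changed: Single-pass scanning tokenizer with a flush-on-delimiter buffer, instead of rebuilding the string with space-padded operators and re-splitting it; same linear cost.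
import Mathlib
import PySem

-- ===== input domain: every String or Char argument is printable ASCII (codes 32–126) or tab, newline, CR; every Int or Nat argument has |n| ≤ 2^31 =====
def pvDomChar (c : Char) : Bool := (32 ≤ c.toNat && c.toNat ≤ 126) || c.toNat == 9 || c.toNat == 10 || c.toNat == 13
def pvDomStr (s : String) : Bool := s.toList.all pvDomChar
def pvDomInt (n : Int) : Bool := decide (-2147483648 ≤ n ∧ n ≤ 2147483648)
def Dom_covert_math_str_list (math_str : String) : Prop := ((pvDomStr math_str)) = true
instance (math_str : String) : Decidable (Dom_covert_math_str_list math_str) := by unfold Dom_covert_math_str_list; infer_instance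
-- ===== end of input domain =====

-- ===== PORT A =====
-- B changes the decomposition: a single-pass buffer scanner instead of pad-join-resplit (same linear cost, different traversal).
def operators : PySem.Dict Char Int :=
  ((((((((PySem.Dict.empty.insert '|' 0).insert '(' 5).insert ')' 5).insert '^' 2).insert
      '*' 3).insert '/' 3).insert '+' 4).insert '-' 4)

def covert_math_str_list (math_str : String) : List String :=
  let cs := PySem.Chars.replace math_str.toList [' '] []
  let math_list : List (List Char) := cs.map (fun c => [c])
  let math_list := math_list.map (fun t =>
    match t with
    | [c] => if operators.contains c then [' ', c, ' '] else [c]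
    | t => t)
  (PySem.Chars.split₀ (PySem.Chars.join [] math_list)).map String.ofList

-- ===== PORT B =====
def scanStep (st : List (List Char) × List Char) (c : Char) : List (List Char) × List Char :=
  if operators.contains c then
    (st.1 ++ (if st.2 ≠ [] then [st.2] else []) ++ [[c]], [])
  else if PySem.Chars.isspace c then
    (st.1 ++ (if st.2 ≠ [] then [st.2] else []), [])
  else
    (st.1, st.2 ++ [c])

def covert_math_str_list_alt (math_str : String) : List String :=
  let cs := PySem.Chars.replace math_str.toList [' '] []
  let fin := cs.foldl scanStep ([], [])
  ((fin.1 ++ (if fin.2 ≠ [] then [fin.2] else [])).map String.ofList)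

-- ===== PRECONDITION & SPEC =====
def Spec_covert_math_str_list (math_str : String) (out : List String) : Prop := out = covert_math_str_list_alt math_str
instance (math_str : String) (out : List String) : Decidable (Spec_covert_math_str_list math_str out) := by unfold Spec_covert_math_str_list; infer_instance

-- ===== CLAIM (what is proved, stated in full; the proofs are below) =====
def Claim_equal_covert_math_str_list : Prop := ∀ (math_str : String), Dom_covert_math_str_list math_str → Spec_covert_math_str_list math_str (covert_math_str_list math_str)

-- ===== LEMMAS AND PROOFS =====

lemma operators_contains (c : Char) :
    operators.contains c =
      (c == '-' || (c == '+' || (c == '/' || (c == '*' || (c == '^' || (c == ')' || (c == '(' || c == '|'))))))) := by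
  simp [operators, PySem.Dict.contains_insert, PySem.Dict.contains_empty]

lemma not_isspace_of_operator (c : Char) (h : operators.contains c = true) :
    PySem.Chars.isspace c = false := by
  rw [operators_contains] at h
  simp only [Bool.or_eq_true, beq_iff_eq] at h
  rcases h with h | h | h | h | h | h | h | h <;> subst h <;> decide

lemma scan_invariant (cs : List Char) (res : List (List Char)) (buf : List Char) :
    PySem.Chars.split₀.go
      ((cs.map (fun c => if operators.contains c then [' ', c, ' '] else [c])).flatten)
      buf.reverse res.reverse
    = (let fin := cs.foldl scanStep (res, buf)
       fin.1 ++ (if fin.2 ≠ [] then [fin.2] else [])) := by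
  induction cs generalizing res buf with
  | nil =>
    simp only [List.map_nil, List.flatten_nil, List.foldl_nil, PySem.Chars.split₀.go]
    by_cases hb : buf = []
    · subst hb; simp
    · rw [if_neg (by simp [hb])]
      simp [hb]
  | cons c rest ih =>
    simp only [List.map_cons, List.flatten_cons]
    by_cases hop : operators.contains c = true
    · have hsp := not_isspace_of_operator c hop
      rw [if_pos hop]
      simp only [List.cons_append, List.nil_append]
      -- step 1: ' ' flushes the buffer
      conv_lhs => rw [PySem.Chars.split₀.go]
      rw [if_pos (show PySem.Chars.isspace ' ' = true from rfl)]
      by_cases hb : buf = []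
      · subst hb
        rw [if_pos (by simp)]
        -- step 2: the operator char goes into the (empty) buffer
        conv_lhs => rw [PySem.Chars.split₀.go]
        rw [if_neg (by simp [hsp])]
        -- step 3: the trailing ' ' flushes [c]
        conv_lhs => rw [PySem.Chars.split₀.go]
        rw [if_pos (show PySem.Chars.isspace ' ' = true from rfl), if_neg (by simp)]
        have h := ih (res ++ [[c]]) []
        simp only [List.reverse_nil, List.reverse_append, List.reverse_cons,
          List.nil_append] at h
        simp only [List.reverse_cons, List.reverse_nil, List.nil_append,
          List.singleton_append] at h ⊢
        rw [h]
        simp [scanStep, hop]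
      · rw [if_neg (by simp [hb])]
        conv_lhs => rw [PySem.Chars.split₀.go]
        rw [if_neg (by simp [hsp])]
        conv_lhs => rw [PySem.Chars.split₀.go]
        rw [if_pos (show PySem.Chars.isspace ' ' = true from rfl), if_neg (by simp)]
        have h := ih (res ++ [buf] ++ [[c]]) []
        simp only [List.reverse_nil, List.reverse_append, List.reverse_cons,
          List.nil_append] at h
        simp only [List.reverse_cons, List.reverse_nil, List.nil_append,
          List.singleton_append, List.reverse_reverse] at h ⊢
        rw [h]
        simp [scanStep, hop, hb]
    · rw [if_neg hop]
      simp only [List.singleton_append]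
      conv_lhs => rw [PySem.Chars.split₀.go]
      by_cases hsp : PySem.Chars.isspace c = true
      · rw [if_pos hsp]
        by_cases hb : buf = []
        · subst hb
          rw [if_pos (by simp)]
          have h := ih res []
          simp only [List.reverse_nil] at h
          rw [h]
          simp [scanStep, hop, hsp]
        · rw [if_neg (by simp [hb])]
          have h := ih (res ++ [buf]) []
          simp only [List.reverse_nil, List.reverse_append, List.reverse_cons,
            List.nil_append, List.reverse_reverse, List.singleton_append] at h ⊢
          rw [h]
          simp [scanStep, hop, hsp, hb]
      · rw [if_neg hsp]
        have h := ih res (buf ++ [c])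
        simp only [List.reverse_append, List.reverse_cons, List.reverse_nil,
          List.nil_append, List.singleton_append] at h
        rw [h]
        simp [scanStep, hop, hsp]

lemma map_pad_eq (cs : List Char) :
    (cs.map (fun c => [c])).map (fun t =>
      match t with
      | [c] => if operators.contains c then [' ', c, ' '] else [c]
      | t => t)
    = cs.map (fun c => if operators.contains c then [' ', c, ' '] else [c]) := by
  induction cs with
  | nil => rfl
  | cons c rest ih => simp [ih]

lemma flatten_intersperse_nil {α : Type} (l : List (List α)) :
    (List.intersperse [] l).flatten = l.flatten := by
  induction l with
  | nil => rfl
  | cons x t ih => cases t <;> simp_all [List.intersperse]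

-- ===== VERDICT (by name: the statement is the Claim_ definition above) =====
theorem covert_math_str_list_spec : Claim_equal_covert_math_str_list := by
  intro s _
  unfold Spec_covert_math_str_list covert_math_str_list covert_math_str_list_alt
  simp only [map_pad_eq, PySem.Chars.join, List.intercalate, flatten_intersperse_nil,
    PySem.Chars.split₀]
  have h := scan_invariant (PySem.Chars.replace s.toList [' '] []) [] []
  simp only [List.reverse_nil] at h
  rw [h]
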